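-- pv_equiv track=rewrite | github.com/tejava7177/New_LSTM | LSTM/model/data_prep/clean_jazz.py | too_repetitive
-- ===== SOURCE A (Python) =====
-- def too_repetitive(seq):
--     if len(seq) < 8: return True
--     uniq_ratio = len(set(seq)) / len(seq)
--     if uniq_ratio < 0.2: return True
--     # 동일 코드 4연속 이상 금지
--     run = 1
--     for a,b in zip(seq, seq[1:]):
--         run = run+1 if a==b else 1
--         if run >= 4: return True
--     return False
-- ===== SOURCE B (Python) =====
-- def too_repetitive(seq):
--     if len(seq) < 8:
--         return True
--     if len(set(seq)) / len(seq) < 0.2: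
--         return True
--     # sliding window of 4: any four consecutive equal elements
--     return any(a == b == c == d for a, b, c, d in zip(seq, seq[1:], seq[2:], seq[3:]))
-- ===== Notes on version B (the rewrite author's own statement) =====
-- stated objective: alternative
-- what changed: The manual run-counter loop (pairwise zip with a running streak integer and early return at 4) is replaced by a stateless sliding-window scan: any 4-tuple of consecutive seq elements that are all equal; the length and unique-ratio guards are unchanged.
import Mathlib
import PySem

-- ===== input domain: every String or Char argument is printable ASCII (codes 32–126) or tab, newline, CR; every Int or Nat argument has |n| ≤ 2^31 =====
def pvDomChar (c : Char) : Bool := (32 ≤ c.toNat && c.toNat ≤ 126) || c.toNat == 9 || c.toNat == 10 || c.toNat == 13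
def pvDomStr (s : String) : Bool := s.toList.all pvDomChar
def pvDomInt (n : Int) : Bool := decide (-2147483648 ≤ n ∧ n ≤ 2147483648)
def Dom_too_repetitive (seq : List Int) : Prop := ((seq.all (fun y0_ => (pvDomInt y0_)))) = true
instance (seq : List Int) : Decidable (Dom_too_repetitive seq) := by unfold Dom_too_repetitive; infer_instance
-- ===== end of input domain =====

-- B replaces A's running streak counter by a stateless sliding window of four
-- consecutive elements (objective: alternative decomposition, same O(n) cost).
-- Both ports render `len(set(seq))/len(seq) < 0.2` as the integer test
-- 5*len(set(seq)) < len(seq): exact for the rational values, and the float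
-- division Python performs is exact for these list lengths (far below 2^53/5).

-- ===== PORT A =====
-- the for-loop over zip(seq, seq[1:]) with the run counter and early returns
def pvLoopA (prev : Int) (run : Int) : List Int → Bool
  | [] => false
  | b :: t =>
    let run' := if prev = b then run + 1 else 1
    if run' ≥ 4 then true else pvLoopA b run' t

def too_repetitive (seq : List Int) : Bool :=
  if seq.length < 8 then true
  else if 5 * (PySem.Set.ofList seq).length < seq.length then true
  else
    match seq with
    | [] => false
    | a :: t => pvLoopA a 1 t

-- ===== PORT B =====
-- pvWin l = "the first four elements of l exist and are all equal" (one zip4 tuple)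
def pvWin : List Int → Bool
  | a :: b :: c :: d :: _ => decide (a = b ∧ b = c ∧ c = d)
  | _ => false

-- any(...) over the zip4 of seq with its three tails = any window of 4 equal
def pvWin4 : List Int → Bool
  | [] => false
  | x :: t => pvWin (x :: t) || pvWin4 t

def too_repetitive_alt (seq : List Int) : Bool :=
  if seq.length < 8 then true
  else if 5 * (PySem.Set.ofList seq).length < seq.length then true
  else pvWin4 seq

-- ===== PRECONDITION & SPEC =====
def Spec_too_repetitive (seq : List Int) (out : Bool) : Prop := out = too_repetitive_alt seq
instance (seq : List Int) (out : Bool) : Decidable (Spec_too_repetitive seq out) := by unfold Spec_too_repetitive; infer_instance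

-- ===== CLAIM (what is proved, stated in full; the proofs are below) =====
def Claim_equal_too_repetitive : Prop := ∀ (seq : List Int), Dom_too_repetitive seq → Spec_too_repetitive seq (too_repetitive seq)

-- ===== LEMMAS AND PROOFS =====

lemma pvWin_ne3 (x y z : Int) (l : List Int) (h : ¬(x = y ∧ y = z)) :
    pvWin (x :: y :: z :: l) = false := by
  cases l <;> simp [pvWin] <;> tauto

lemma pvWin_ne2 (x y : Int) (l : List Int) (h : x ≠ y) :
    pvWin (x :: y :: l) = false := by
  cases l with
  | nil => rfl
  | cons z m => exact pvWin_ne3 x y z m (by tauto)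

lemma pvWin4_skip (p b : Int) (t : List Int) (k : Nat) (hk : k = 1 ∨ k = 2 ∨ k = 3)
    (hne : p ≠ b) : pvWin4 (List.replicate k p ++ b :: t) = pvWin4 (b :: t) := by
  have h2 := pvWin_ne2 p b t hne
  have h3 := pvWin_ne3 p p b t (fun hc => hne hc.2)
  have h4 : pvWin (p :: p :: p :: b :: t) = false := by simp [pvWin, hne]
  rcases hk with h | h | h <;> subst h <;>
    simp [List.replicate, pvWin4, h2, h3, h4]

lemma pvLoopA_eq_pvWin4 : ∀ (rest : List Int) (prev run : Int),
    (run = 1 ∨ run = 2 ∨ run = 3) →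
    pvLoopA prev run rest = pvWin4 (List.replicate run.toNat prev ++ rest) := by
  intro rest
  induction rest with
  | nil =>
    intro p run h
    rcases h with h | h | h <;> subst h <;> simp [pvLoopA, pvWin4, pvWin]
  | cons b t ih =>
    intro p run h
    by_cases hpb : p = b
    · subst hpb
      rcases h with h | h | h <;> subst h
      · have : List.replicate (1 : Int).toNat p ++ p :: t =
            List.replicate (2 : Int).toNat p ++ t := by simp [List.replicate]
        rw [this, ← ih p 2 (by tauto)]
        simp [pvLoopA]
      · have : List.replicate (2 : Int).toNat p ++ p :: t =
            List.replicate (3 : Int).toNat p ++ t := by simp [List.replicate]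
        rw [this, ← ih p 3 (by tauto)]
        simp [pvLoopA]
      · simp [pvLoopA, List.replicate, pvWin4, pvWin]
    · have hrun : pvLoopA p run (b :: t) = pvLoopA b 1 t := by
        rcases h with h | h | h <;> subst h <;> simp [pvLoopA, hpb]
      rw [hrun, ih b 1 (by tauto)]
      have hk : run.toNat = 1 ∨ run.toNat = 2 ∨ run.toNat = 3 := by
        rcases h with h | h | h <;> subst h <;> simp
      have : List.replicate (1 : Int).toNat b ++ t = b :: t := by simp [List.replicate]
      rw [this, pvWin4_skip p b t run.toNat hk hpb]

-- ===== VERDICT (by name: the statement is the Claim_ definition above) =====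
theorem too_repetitive_spec : Claim_equal_too_repetitive := by
  intro seq _
  unfold Spec_too_repetitive too_repetitive too_repetitive_alt
  split_ifs with h1 h2
  · rfl
  · rfl
  · cases seq with
    | nil => simp at h1
    | cons a t =>
      have := pvLoopA_eq_pvWin4 t a 1 (by tauto)
      simpa [List.replicate] using this
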